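-- pv_equiv track=rewrite | github.com/pypi-data/pypi-mirror-384 | packages/groupit/groupit-0.1.2-py3-none-any.whl/groupit/language_support.py | _classify_ini_file
-- ===== SOURCE A (Python) =====
-- def _classify_ini_file(filename_lower: str, full_path_lower: str) -> str:
--     """Classify INI files based on filename patterns"""
--     # PlatformIO specific
--     if 'platformio.ini' in filename_lower:
--         return 'platformio'
--
--     # Other specific INI files
--     specific_inis = {
--         'setup.cfg': 'ini',
--         'tox.ini': 'ini',
--         'pytest.ini': 'ini',
--         'mypy.ini': 'ini',
--         'supervisord.conf': 'ini',
--         '.editorconfig': 'ini',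
--     }
--
--     for specific_file, lang in specific_inis.items():
--         if specific_file in filename_lower:
--             return lang
--
--     # Generic INI
--     return 'ini'
-- ===== SOURCE B (Python) =====
-- def _classify_ini_file(filename_lower: str, full_path_lower: str) -> str:
--     """Classify INI files: every non-PlatformIO case collapses to 'ini'."""
--     return 'platformio' if 'platformio.ini' in filename_lower else 'ini'
-- ===== Notes on version B (the rewrite author's own statement) =====
-- stated objective: simpler
-- what changed: B drops A's six-entry dict and its substring-scanning loop entirely, since every dict value and the fallback are 'ini'; B is a single conditional with one substring test.
import Mathlib
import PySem

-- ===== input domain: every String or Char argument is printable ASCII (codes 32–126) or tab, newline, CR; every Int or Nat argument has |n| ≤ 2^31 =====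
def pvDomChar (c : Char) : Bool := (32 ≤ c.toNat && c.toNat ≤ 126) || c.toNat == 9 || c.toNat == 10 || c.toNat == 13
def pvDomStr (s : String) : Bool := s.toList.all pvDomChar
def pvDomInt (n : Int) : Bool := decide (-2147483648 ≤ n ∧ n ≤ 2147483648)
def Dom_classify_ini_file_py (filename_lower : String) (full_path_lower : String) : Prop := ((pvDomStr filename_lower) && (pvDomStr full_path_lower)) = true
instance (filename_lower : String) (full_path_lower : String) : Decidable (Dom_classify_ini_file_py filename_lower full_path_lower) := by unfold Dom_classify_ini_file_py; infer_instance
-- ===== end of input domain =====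

-- B drops A's redundant dict and pattern loop (every entry and the fallback yield "ini"): one substring test decides.


-- ===== PORT A =====
-- helper: the 'for specific_file, lang in specific_inis.items()' loop (first match wins, none = fall through)
def pvIniLoop (items : List (String × String)) (filename_lower : String) : Option String :=
  match items with
  | [] => none
  | (specific_file, lang) :: rest =>
      if PySem.Str.isIn specific_file filename_lower then some lang
      else pvIniLoop rest filename_lower

def classify_ini_file_py (filename_lower : String) (full_path_lower : String) : String :=
  if PySem.Str.isIn "platformio.ini" filename_lower then "platformio"
  else
    let specific_inis : PySem.Dict String String := PySem.Dict.ofList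
      [("setup.cfg", "ini"), ("tox.ini", "ini"), ("pytest.ini", "ini"),
       ("mypy.ini", "ini"), ("supervisord.conf", "ini"), (".editorconfig", "ini")]
    match pvIniLoop specific_inis.items filename_lower with
    | some lang => lang
    | none => "ini"

-- ===== PORT B =====
def classify_ini_file_py_alt (filename_lower : String) (full_path_lower : String) : String :=
  if PySem.Str.isIn "platformio.ini" filename_lower then "platformio" else "ini"

-- ===== PRECONDITION & SPEC =====
def Spec_classify_ini_file_py (filename_lower : String) (full_path_lower : String) (out : String) : Prop := out = classify_ini_file_py_alt filename_lower full_path_lower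
instance (filename_lower : String) (full_path_lower : String) (out : String) : Decidable (Spec_classify_ini_file_py filename_lower full_path_lower out) := by unfold Spec_classify_ini_file_py; infer_instance

-- ===== CLAIM (what is proved, stated in full; the proofs are below) =====
def Claim_equal_classify_ini_file_py : Prop := ∀ (filename_lower : String) (full_path_lower : String), Dom_classify_ini_file_py filename_lower full_path_lower → Spec_classify_ini_file_py filename_lower full_path_lower (classify_ini_file_py filename_lower full_path_lower)

-- ===== LEMMAS AND PROOFS =====

-- ===== VERDICT (by name: the statement is the Claim_ definition above) =====
-- the loop over A's literal table can only fall through or return "ini"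
theorem pvIniLoop_table (f : String) :
    pvIniLoop (PySem.Dict.ofList
      [("setup.cfg", "ini"), ("tox.ini", "ini"), ("pytest.ini", "ini"),
       ("mypy.ini", "ini"), ("supervisord.conf", "ini"), (".editorconfig", "ini")]).items f = none ∨
    pvIniLoop (PySem.Dict.ofList
      [("setup.cfg", "ini"), ("tox.ini", "ini"), ("pytest.ini", "ini"),
       ("mypy.ini", "ini"), ("supervisord.conf", "ini"), (".editorconfig", "ini")]).items f = some "ini" := by
  rw [show (PySem.Dict.ofList
      [("setup.cfg", "ini"), ("tox.ini", "ini"), ("pytest.ini", "ini"),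
       ("mypy.ini", "ini"), ("supervisord.conf", "ini"), (".editorconfig", "ini")]
       : PySem.Dict String String).items =
      [("setup.cfg", "ini"), ("tox.ini", "ini"), ("pytest.ini", "ini"),
       ("mypy.ini", "ini"), ("supervisord.conf", "ini"), (".editorconfig", "ini")] from rfl]
  simp only [pvIniLoop]
  split_ifs <;> simp

theorem classify_ini_file_py_spec : Claim_equal_classify_ini_file_py := by
  intro f p _
  unfold Spec_classify_ini_file_py classify_ini_file_py classify_ini_file_py_alt
  split_ifs with h
  · rfl
  · rcases pvIniLoop_table f with h2 | h2 <;> simp [h2]
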